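-- pv_equiv track=rewrite | github.com/sustynats/ttliveregie | app.py | image_generation_models_to_try
-- ===== SOURCE A (Python) =====
-- IMAGE_MODELS = [
--     "auto",
--     "gemini-2.5-flash-image",
--     "gemini-2.5-flash-image-preview",
--     "gemini-2.0-flash-preview-image-generation",
--     "imagen-4.0-fast-generate-001",
--     "imagen-4.0-generate-001",
--     "imagen-3.0-generate-002",
-- ]
--
-- def image_generation_models_to_try(selected: str) -> list[str]:
--     selected = selected if selected in IMAGE_MODELS else "auto"
--     if selected == "auto":
--         return [
--             "gemini-2.5-flash-image",
--             "gemini-2.5-flash-image-preview",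
--             "gemini-2.0-flash-preview-image-generation",
--             "imagen-4.0-fast-generate-001",
--             "imagen-3.0-generate-002",
--         ]
--     fallback = {
--         "gemini-2.5-flash-image": ["gemini-2.5-flash-image-preview", "gemini-2.0-flash-preview-image-generation"],
--         "gemini-2.5-flash-image-preview": ["gemini-2.5-flash-image", "gemini-2.0-flash-preview-image-generation"],
--         "gemini-2.0-flash-preview-image-generation": ["gemini-2.5-flash-image", "gemini-2.5-flash-image-preview"],
--         "imagen-4.0-fast-generate-001": ["imagen-3.0-generate-002"],
--         "imagen-4.0-generate-001": ["imagen-4.0-fast-generate-001", "imagen-3.0-generate-002"],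
--         "imagen-3.0-generate-002": ["gemini-2.5-flash-image", "gemini-2.0-flash-preview-image-generation"],
--     }
--     result = [selected]
--     for model in fallback.get(selected, []):
--         if model not in result:
--             result.append(model)
--     return result
-- ===== SOURCE B (Python) =====
-- # One precomputed table: each valid model (incl. "auto") maps to its complete try-list.
-- _TABLE = {
--     "auto": [
--         "gemini-2.5-flash-image",
--         "gemini-2.5-flash-image-preview",
--         "gemini-2.0-flash-preview-image-generation",
--         "imagen-4.0-fast-generate-001",
--         "imagen-3.0-generate-002",
--     ],
--     "gemini-2.5-flash-image": ["gemini-2.5-flash-image", "gemini-2.5-flash-image-preview", "gemini-2.0-flash-preview-image-generation"],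
--     "gemini-2.5-flash-image-preview": ["gemini-2.5-flash-image-preview", "gemini-2.5-flash-image", "gemini-2.0-flash-preview-image-generation"],
--     "gemini-2.0-flash-preview-image-generation": ["gemini-2.0-flash-preview-image-generation", "gemini-2.5-flash-image", "gemini-2.5-flash-image-preview"],
--     "imagen-4.0-fast-generate-001": ["imagen-4.0-fast-generate-001", "imagen-3.0-generate-002"],
--     "imagen-4.0-generate-001": ["imagen-4.0-generate-001", "imagen-4.0-fast-generate-001", "imagen-3.0-generate-002"],
--     "imagen-3.0-generate-002": ["imagen-3.0-generate-002", "gemini-2.5-flash-image", "gemini-2.0-flash-preview-image-generation"],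
-- }
--
-- def image_generation_models_to_try(selected: str) -> list[str]:
--     return list(_TABLE.get(selected, _TABLE["auto"]))
-- ===== Notes on version B (the rewrite author's own statement) =====
-- stated objective: simpler
-- what changed: Replaces the auto special-case branch plus the per-model append/dedup loop over a fallback dict with a single precomputed table mapping each valid model directly to its full output list, returned as a fresh copy via one dict lookup with the auto list as default.
import Mathlib
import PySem

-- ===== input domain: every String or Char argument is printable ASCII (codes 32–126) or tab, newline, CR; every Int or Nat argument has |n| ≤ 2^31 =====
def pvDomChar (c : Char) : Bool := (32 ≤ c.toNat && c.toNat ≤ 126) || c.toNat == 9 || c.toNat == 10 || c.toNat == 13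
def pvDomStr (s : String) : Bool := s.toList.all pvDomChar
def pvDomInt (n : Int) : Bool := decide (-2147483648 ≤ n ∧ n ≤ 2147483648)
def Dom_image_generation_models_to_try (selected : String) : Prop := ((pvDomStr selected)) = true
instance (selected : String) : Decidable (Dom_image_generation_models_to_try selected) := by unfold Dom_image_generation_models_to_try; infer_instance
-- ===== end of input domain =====

-- B replaces A's auto-branch + fallback-dict append/dedup loop with one precomputed
-- table mapping each valid model to its complete output list (objective: simpler).

-- ===== PORT A =====
def IMAGE_MODELS : List String :=
  ["auto",
   "gemini-2.5-flash-image",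
   "gemini-2.5-flash-image-preview",
   "gemini-2.0-flash-preview-image-generation",
   "imagen-4.0-fast-generate-001",
   "imagen-4.0-generate-001",
   "imagen-3.0-generate-002"]

def image_generation_models_to_try (selected : String) : List String :=
  let selected := if IMAGE_MODELS.contains selected then selected else "auto"
  if selected == "auto" then
    ["gemini-2.5-flash-image",
     "gemini-2.5-flash-image-preview",
     "gemini-2.0-flash-preview-image-generation",
     "imagen-4.0-fast-generate-001",
     "imagen-3.0-generate-002"]
  else
    let fallback : PySem.Dict String (List String) := PySem.Dict.ofList
      [("gemini-2.5-flash-image", ["gemini-2.5-flash-image-preview", "gemini-2.0-flash-preview-image-generation"]),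
       ("gemini-2.5-flash-image-preview", ["gemini-2.5-flash-image", "gemini-2.0-flash-preview-image-generation"]),
       ("gemini-2.0-flash-preview-image-generation", ["gemini-2.5-flash-image", "gemini-2.5-flash-image-preview"]),
       ("imagen-4.0-fast-generate-001", ["imagen-3.0-generate-002"]),
       ("imagen-4.0-generate-001", ["imagen-4.0-fast-generate-001", "imagen-3.0-generate-002"]),
       ("imagen-3.0-generate-002", ["gemini-2.5-flash-image", "gemini-2.0-flash-preview-image-generation"])]
    (fallback.getD selected []).foldl
      (fun result model => if result.contains model then result else result ++ [model])
      [selected]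

-- ===== PORT B =====
def pvTable : PySem.Dict String (List String) := PySem.Dict.ofList
  [("auto",
    ["gemini-2.5-flash-image",
     "gemini-2.5-flash-image-preview",
     "gemini-2.0-flash-preview-image-generation",
     "imagen-4.0-fast-generate-001",
     "imagen-3.0-generate-002"]),
   ("gemini-2.5-flash-image",
    ["gemini-2.5-flash-image", "gemini-2.5-flash-image-preview", "gemini-2.0-flash-preview-image-generation"]),
   ("gemini-2.5-flash-image-preview",
    ["gemini-2.5-flash-image-preview", "gemini-2.5-flash-image", "gemini-2.0-flash-preview-image-generation"]),
   ("gemini-2.0-flash-preview-image-generation",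
    ["gemini-2.0-flash-preview-image-generation", "gemini-2.5-flash-image", "gemini-2.5-flash-image-preview"]),
   ("imagen-4.0-fast-generate-001",
    ["imagen-4.0-fast-generate-001", "imagen-3.0-generate-002"]),
   ("imagen-4.0-generate-001",
    ["imagen-4.0-generate-001", "imagen-4.0-fast-generate-001", "imagen-3.0-generate-002"]),
   ("imagen-3.0-generate-002",
    ["imagen-3.0-generate-002", "gemini-2.5-flash-image", "gemini-2.0-flash-preview-image-generation"])]

def image_generation_models_to_try_alt (selected : String) : List String :=
  pvTable.getD selected
    ["gemini-2.5-flash-image",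
     "gemini-2.5-flash-image-preview",
     "gemini-2.0-flash-preview-image-generation",
     "imagen-4.0-fast-generate-001",
     "imagen-3.0-generate-002"]

-- ===== PRECONDITION & SPEC =====
def Spec_image_generation_models_to_try (selected : String) (out : List String) : Prop := out = image_generation_models_to_try_alt selected
instance (selected : String) (out : List String) : Decidable (Spec_image_generation_models_to_try selected out) := by unfold Spec_image_generation_models_to_try; infer_instance

-- ===== CLAIM (what is proved, stated in full; the proofs are below) =====
def Claim_equal_image_generation_models_to_try : Prop := ∀ (selected : String), Dom_image_generation_models_to_try selected → Spec_image_generation_models_to_try selected (image_generation_models_to_try selected)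

-- ===== LEMMAS AND PROOFS =====
theorem pvTable_mk : pvTable = PySem.Dict.mk
  [("auto",
    ["gemini-2.5-flash-image", "gemini-2.5-flash-image-preview", "gemini-2.0-flash-preview-image-generation",
     "imagen-4.0-fast-generate-001", "imagen-3.0-generate-002"]),
   ("gemini-2.5-flash-image",
    ["gemini-2.5-flash-image", "gemini-2.5-flash-image-preview", "gemini-2.0-flash-preview-image-generation"]),
   ("gemini-2.5-flash-image-preview",
    ["gemini-2.5-flash-image-preview", "gemini-2.5-flash-image", "gemini-2.0-flash-preview-image-generation"]),
   ("gemini-2.0-flash-preview-image-generation",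
    ["gemini-2.0-flash-preview-image-generation", "gemini-2.5-flash-image", "gemini-2.5-flash-image-preview"]),
   ("imagen-4.0-fast-generate-001",
    ["imagen-4.0-fast-generate-001", "imagen-3.0-generate-002"]),
   ("imagen-4.0-generate-001",
    ["imagen-4.0-generate-001", "imagen-4.0-fast-generate-001", "imagen-3.0-generate-002"]),
   ("imagen-3.0-generate-002",
    ["imagen-3.0-generate-002", "gemini-2.5-flash-image", "gemini-2.0-flash-preview-image-generation"])] := by
  decide

-- ===== VERDICT (by name: the statement is the Claim_ definition above) =====
theorem image_generation_models_to_try_spec : Claim_equal_image_generation_models_to_try := by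
  intro selected _
  unfold Spec_image_generation_models_to_try image_generation_models_to_try image_generation_models_to_try_alt
  by_cases h1 : selected = "auto"
  · subst h1; decide
  by_cases h2 : selected = "gemini-2.5-flash-image"
  · subst h2; decide
  by_cases h3 : selected = "gemini-2.5-flash-image-preview"
  · subst h3; decide
  by_cases h4 : selected = "gemini-2.0-flash-preview-image-generation"
  · subst h4; decide
  by_cases h5 : selected = "imagen-4.0-fast-generate-001"
  · subst h5; decide
  by_cases h6 : selected = "imagen-4.0-generate-001"
  · subst h6; decide
  by_cases h7 : selected = "imagen-3.0-generate-002"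
  · subst h7; decide
  simp [IMAGE_MODELS, pvTable_mk, PySem.Dict.getD, PySem.Dict.get?,
        h1, h2, h3, h4, h5, h6, h7,
        Ne.symm h1, Ne.symm h2, Ne.symm h3, Ne.symm h4, Ne.symm h5, Ne.symm h6, Ne.symm h7]
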